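-- pv_equiv track=rewrite | github.com/dplocki/advent-of-code | 2018/2018_25.py | assign_constelations
-- ===== SOURCE A (Python) =====
-- import itertools
--
-- def distance(p1, p2):
--     return sum([abs(p2[i] - p1[i]) for i in range(4)])
--
-- def assign_constelations(coordinates):
--
--     def build_graph(coordinates: []):
--         graph = { c:set() for c in coordinates }
--         for p1, p2 in itertools.combinations(coordinates, 2):
--             if p1 != p2 and distance(p1, p2) <= 3:
--                 graph[p1].add(p2)
--                 graph[p2].add(p1)
--
--         return graph
--
--     def find_all(graph, p, was):
--         was.add(p)
--         for s in graph[p]: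
--             if s in was:
--                 continue
--
--             yield s
--             was.add(s)
--             for x in find_all(graph, s, was):
--                 yield x
--
--     index = 0
--     constelations = {}
--     graph = build_graph(coordinates)
--
--     for c in coordinates:
--         if c in constelations:
--             continue
--
--         constelations[c] = index
--         for x in find_all(graph, c, set()):
--             constelations[x] = index
--
--         index += 1
--
--     return constelations
-- ===== SOURCE B (Python) =====
-- def assign_constelations(coordinates):
--     points = list(dict.fromkeys(coordinates))
--     labels = {}
--     index = 0
--     for c in points:
--         if c in labels:
--             continue
--         seen = set()
--         stack = [c]
--         while stack:
--             p = stack.pop()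
--             if p in seen:
--                 continue
--             seen.add(p)
--             labels[p] = index
--             neighbours = [q for q in points
--                           if q != p and abs(q[0] - p[0]) + abs(q[1] - p[1])
--                           + abs(q[2] - p[2]) + abs(q[3] - p[3]) <= 3]
--             stack.extend(reversed(neighbours))
--         index += 1
--     return labels
-- ===== Notes on version B (the rewrite author's own statement) =====
-- stated objective: simpler
-- what changed: B drops A's prebuilt dict-of-sets adjacency graph (itertools.combinations) and the recursive nested generator: it dedups the coordinates once and flood-fills each constellation with an explicit stack, computing neighbours on the fly, assigning labels at pop time.
import Mathlib
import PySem

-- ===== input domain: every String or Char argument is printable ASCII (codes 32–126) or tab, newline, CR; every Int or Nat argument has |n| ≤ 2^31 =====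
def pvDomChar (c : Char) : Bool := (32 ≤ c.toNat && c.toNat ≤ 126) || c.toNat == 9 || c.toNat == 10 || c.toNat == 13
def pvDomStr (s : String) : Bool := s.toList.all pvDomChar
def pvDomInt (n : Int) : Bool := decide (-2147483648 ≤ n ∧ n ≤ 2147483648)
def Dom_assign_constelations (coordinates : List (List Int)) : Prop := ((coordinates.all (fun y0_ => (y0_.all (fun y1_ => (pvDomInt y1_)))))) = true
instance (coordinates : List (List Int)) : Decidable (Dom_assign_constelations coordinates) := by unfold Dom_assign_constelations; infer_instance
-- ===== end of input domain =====

-- B replaces A's prebuilt graph (dict of sets + recursive generator DFS) by a stack-based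
-- flood fill over the deduplicated points with neighbours computed on the fly: simpler, same value.


-- ===== PORT A =====
-- distance(p1, p2) = sum([abs(p2[i] - p1[i]) for i in range(4)]); the indexing p[i] is ported
-- with the total pyGetD — under Pre_ every index that Python evaluates is in range, so exact.
def pvDistance (p1 p2 : List Int) : Int :=
  ((PySem.List.pyRange 0 4 1).map
    (fun i => |PySem.List.pyGetD p2 i 0 - PySem.List.pyGetD p1 i 0|)).sum

-- itertools.combinations(xs, 2), in iteration order
def pvCombos (xs : List (List Int)) : List (List Int × List Int) :=
  match xs with
  | [] => []
  | x :: rest => rest.map (fun y => (x, y)) ++ pvCombos rest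

-- build_graph; graph[p].add(q) is Dict.modify (the key is always present when Python runs it)
def pvBuildGraph (coordinates : List (List Int)) :
    PySem.Dict (List Int) (PySem.Set (List Int)) :=
  let graph := coordinates.foldl
    (fun g c => PySem.Dict.insert g c PySem.Set.empty) PySem.Dict.empty
  (pvCombos coordinates).foldl
    (fun g pq =>
      if pq.1 ≠ pq.2 ∧ pvDistance pq.1 pq.2 ≤ 3 then
        PySem.Dict.modify
          (PySem.Dict.modify g pq.1 PySem.Set.empty (fun s => PySem.Set.add s pq.2))
          pq.2 PySem.Set.empty (fun s => PySem.Set.add s pq.1)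
      else g)
    graph

-- find_all: the recursive generator with the shared mutable `was`, returned as
-- (yielded nodes in order, final was).  Python iterates the set graph[p] in hash order,
-- which PySem does not model; the insertion-ordered Set list is used (the function's result
-- is a dict, compared order-insensitively).  fuel bounds the recursion depth only;
-- |coordinates| + 1 (used below) is proved sufficient.
def pvFindAll (graph : PySem.Dict (List Int) (PySem.Set (List Int))) :
    Nat → List Int → PySem.Set (List Int) → List (List Int) × PySem.Set (List Int)
  | 0, _, was => ([], was)
  | fuel + 1, p, was =>
    (PySem.Dict.getD graph p PySem.Set.empty).foldl
      (fun r s =>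
        if s ∈ r.2 then r
        else
          let rec2 := pvFindAll graph fuel s (PySem.Set.add r.2 s)
          (r.1 ++ s :: rec2.1, rec2.2))
      ([], PySem.Set.add was p)

def assign_constelations (coordinates : List (List Int)) : List (List Int × Int) :=
  let graph := pvBuildGraph coordinates
  (coordinates.foldl
    (fun (st : PySem.Dict (List Int) Int × Int) c =>
      if PySem.Dict.contains st.1 c then st
      else
        let cons := PySem.Dict.insert st.1 c st.2
        let r := pvFindAll graph (coordinates.length + 1) c PySem.Set.empty
        (r.1.foldl (fun d x => PySem.Dict.insert d x st.2) cons, st.2 + 1))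
    (PySem.Dict.empty, 0)).1.items

-- ===== PORT B =====
-- (Source B) abs(q[0]-p[0]) + abs(q[1]-p[1]) + abs(q[2]-p[2]) + abs(q[3]-p[3])
def pvDist4 (p q : List Int) : Int :=
  |PySem.List.pyGetD q 0 0 - PySem.List.pyGetD p 0 0| +
  |PySem.List.pyGetD q 1 0 - PySem.List.pyGetD p 1 0| +
  |PySem.List.pyGetD q 2 0 - PySem.List.pyGetD p 2 0| +
  |PySem.List.pyGetD q 3 0 - PySem.List.pyGetD p 3 0|

-- the `while stack:` loop; Python pops/extends at the right end, modelled with the top of the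
-- stack at the HEAD (pop = head; stack.extend(reversed(ns)) = ns ++ rest) — exact.
-- fuel bounds the number of iterations; (|points|+1)^2 (used below) is proved sufficient.
def pvFlood (points : List (List Int)) (index : Int) :
    Nat → PySem.Dict (List Int) Int → PySem.Set (List Int) → List (List Int) →
      PySem.Dict (List Int) Int × PySem.Set (List Int)
  | _, labels, seen, [] => (labels, seen)
  | 0, labels, seen, _ :: _ => (labels, seen)
  | fuel + 1, labels, seen, p :: rest =>
    if p ∈ seen then pvFlood points index fuel labels seen rest
    else
      pvFlood points index fuel (PySem.Dict.insert labels p index) (PySem.Set.add seen p)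
        ((points.filter (fun q => decide (q ≠ p) && decide (pvDist4 p q ≤ 3))) ++ rest)

def assign_constelations_alt (coordinates : List (List Int)) : List (List Int × Int) :=
  let points := PySem.List.dedup coordinates
  (points.foldl
    (fun (st : PySem.Dict (List Int) Int × Int) c =>
      if PySem.Dict.contains st.1 c then st
      else
        ((pvFlood points st.2 ((points.length + 1) * (points.length + 1)) st.1
            PySem.Set.empty [c]).1, st.2 + 1))
    (PySem.Dict.empty, 0)).1.items

-- ===== PRECONDITION & SPEC =====
-- Pre_ excludes exactly the inputs on which the Python A raises IndexError: a coordinate with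
-- fewer than 4 components that gets compared against a different coordinate (distance p q is
-- evaluated exactly on the distinct pairs).
def Pre_assign_constelations (coordinates : List (List Int)) : Prop :=
  (∀ c ∈ coordinates, 4 ≤ c.length) ∨ (∀ p ∈ coordinates, ∀ q ∈ coordinates, p = q)
instance (coordinates : List (List Int)) : Decidable (Pre_assign_constelations coordinates) := by
  unfold Pre_assign_constelations; infer_instance

def pvWitness_assign_constelations : List (List Int) :=
  [[0, 0, 0, 0], [1, 0, 0, 0], [10, 10, 10, 10], [1, 0, 0, 0]]

def Spec_assign_constelations (coordinates : List (List Int)) (out : List (List Int × Int)) : Prop :=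
  out = assign_constelations_alt coordinates
instance (coordinates : List (List Int)) (out : List (List Int × Int)) :
    Decidable (Spec_assign_constelations coordinates out) := by
  unfold Spec_assign_constelations; infer_instance

-- ===== CLAIM (what is proved, stated in full; the proofs are below) =====
def Claim_equal_assign_constelations : Prop :=
  ∀ (coordinates : List (List Int)), Dom_assign_constelations coordinates →
    Pre_assign_constelations coordinates →
      Spec_assign_constelations coordinates (assign_constelations coordinates)

-- ===== LEMMAS AND PROOFS =====

-- the common neighbour predicate / neighbour list (B's filter, eta-expanded)
def pvPred (p q : List Int) : Bool := decide (q ≠ p) && decide (pvDist4 p q ≤ 3)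

def pvNb (U : List (List Int)) (p : List Int) : List (List Int) := U.filter (pvPred p)

-- the values the combination loop adds to graph[p], in order
def pvOpp (L : List (List Int × List Int)) (p : List Int) : List (List Int) :=
  L.flatMap (fun ab =>
    if ab.1 ≠ ab.2 ∧ pvDistance ab.1 ab.2 ≤ 3 then
      (if ab.1 = p then [ab.2] else []) ++ (if ab.2 = p then [ab.1] else [])
    else [])

-- reference traversal: recursive DFS over a stack of pending nodes (visit order, final seen)
def pvTrav (nb : List Int → List (List Int)) :
    Nat → PySem.Set (List Int) → List (List Int) →
      List (List Int) × PySem.Set (List Int)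
  | _, seen, [] => ([], seen)
  | 0, seen, _ :: _ => ([], seen)
  | fuel + 1, seen, p :: st =>
    if p ∈ seen then pvTrav nb fuel seen st
    else
      let r1 := pvTrav nb fuel (PySem.Set.add seen p) (nb p)
      let r2 := pvTrav nb fuel r1.2 st
      (p :: (r1.1 ++ r2.1), r2.2)

def pvM (U seen : List (List Int)) : Nat := (U.filter (fun x => decide (x ∉ seen))).length

def pvRank (U seen st : List (List Int)) : Nat := pvM U seen * (U.length + 1) + st.length

theorem pv_dist_eq (a b : List Int) : pvDistance a b = pvDist4 a b := by
  have h4 : PySem.List.pyRange 0 4 1 = [0, 1, 2, 3] := by decide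
  simp only [pvDistance, pvDist4, h4, List.map_cons, List.map_nil, List.sum_cons, List.sum_nil]
  ring

theorem pv_dist4_comm (a b : List Int) : pvDist4 a b = pvDist4 b a := by
  simp only [pvDist4]
  rw [abs_sub_comm (PySem.List.pyGetD b 0 0), abs_sub_comm (PySem.List.pyGetD b 1 0),
    abs_sub_comm (PySem.List.pyGetD b 2 0), abs_sub_comm (PySem.List.pyGetD b 3 0)]

theorem pv_pred_ne {p q : List Int} (h : pvPred p q = true) : q ≠ p := by
  simp only [pvPred, Bool.and_eq_true, decide_eq_true_eq] at h
  exact h.1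

-- ---------- Set / dedup toolkit ----------

theorem pv_add_of_mem {s : PySem.Set (List Int)} {x : List Int} (h : x ∈ s) :
    PySem.Set.add s x = s := by
  simp [PySem.Set.add, PySem.Set.contains, h]

theorem pv_add_of_not_mem {s : PySem.Set (List Int)} {x : List Int} (h : x ∉ s) :
    PySem.Set.add s x = s ++ [x] := by
  simp [PySem.Set.add, PySem.Set.contains, h]

theorem pv_foldl_add : ∀ (l : List (List Int)) (s : PySem.Set (List Int)),
    l.foldl PySem.Set.add s
      = s ++ (l.foldl PySem.Set.add []).filter (fun y => decide (y ∉ s))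
  | [], s => by simp
  | x :: l, s => by
    have hnil : List.foldl PySem.Set.add ([] : PySem.Set (List Int)) (x :: l)
        = List.foldl PySem.Set.add [x] l := by
      simp only [List.foldl_cons]
      rw [pv_add_of_not_mem (List.not_mem_nil)]
      rfl
    have hx : List.foldl PySem.Set.add [x] l
        = [x] ++ (l.foldl PySem.Set.add []).filter (fun y => decide (y ∉ ([x] : List (List Int)))) :=
      pv_foldl_add l [x]
    have hsing : PySem.Set.add ([] : PySem.Set (List Int)) x = [x] := by
      rw [pv_add_of_not_mem (List.not_mem_nil)]; rfl
    simp only [List.foldl_cons, hsing]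
    rw [pv_foldl_add l (PySem.Set.add s x), hx]
    by_cases hxs : x ∈ s
    · rw [pv_add_of_mem hxs, List.filter_append]
      have h1 : ([x] : List (List Int)).filter (fun y => decide (y ∉ s)) = [] := by
        simp [hxs]
      rw [h1, List.nil_append, List.filter_filter]
      refine congrArg (s ++ ·) (List.filter_congr ?_).symm
      intro a _
      by_cases has : a ∈ s
      · simp [has]
      · have hax : a ≠ x := fun h => has (h ▸ hxs)
        simp [has, hax]
    · rw [pv_add_of_not_mem hxs, List.filter_append]
      have h1 : ([x] : List (List Int)).filter (fun y => decide (y ∉ s)) = [x] := by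
        simp [hxs]
      rw [h1, List.filter_filter, List.append_assoc]
      refine congrArg (s ++ ·) (congrArg ([x] ++ ·) (List.filter_congr ?_))
      intro a _
      by_cases hax : a = x
      · simp [hax, hxs]
      · by_cases has : a ∈ s <;> simp [has, hax]

theorem pv_dedup_eq_foldl (l : List (List Int)) :
    PySem.List.dedup l = l.foldl PySem.Set.add [] := by
  rw [PySem.List.dedup_eq_ofList, PySem.Set.ofList_eq_foldl]

theorem pv_dedup_cons (x : List Int) (l : List (List Int)) :
    PySem.List.dedup (x :: l) = x :: (PySem.List.dedup l).filter (fun y => decide (y ≠ x)) := by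
  rw [pv_dedup_eq_foldl, pv_dedup_eq_foldl]
  have hnil : List.foldl PySem.Set.add ([] : PySem.Set (List Int)) (x :: l)
      = List.foldl PySem.Set.add [x] l := by
    simp only [List.foldl_cons]
    rw [pv_add_of_not_mem (List.not_mem_nil)]
    rfl
  rw [hnil, pv_foldl_add l [x]]
  refine congrArg (fun t => x :: t) (List.filter_congr ?_)
  intro a _
  simp

theorem pv_dedup_append_sub {l l' : List (List Int)} (h : ∀ y ∈ l', y ∈ l) :
    PySem.List.dedup (l ++ l') = PySem.List.dedup l := by
  rw [pv_dedup_eq_foldl, List.foldl_append, ← pv_dedup_eq_foldl, pv_foldl_add, ← pv_dedup_eq_foldl]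
  have : (PySem.List.dedup l').filter (fun y => decide (y ∉ PySem.List.dedup l)) = [] := by
    rw [List.filter_eq_nil_iff]
    intro a ha
    have ha' : a ∈ l' := by
      simpa [PySem.List.dedup_eq_ofList, PySem.Set.mem_ofList] using ha
    simp only [decide_eq_true_eq, not_not, PySem.List.dedup_eq_ofList, PySem.Set.mem_ofList]
    exact h a ha'
  rw [this, List.append_nil]

theorem pv_filter_ne_of_not_mem {x : List Int} {l : List (List Int)} (h : x ∉ l) :
    l.filter (fun y => decide (y ≠ x)) = l := by
  rw [List.filter_eq_self]
  intro a ha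
  have : a ≠ x := fun he => h (he ▸ ha)
  simp [this]

theorem pv_dedup_filter (f : List Int → Bool) : ∀ (l : List (List Int)),
    PySem.List.dedup (l.filter f) = (PySem.List.dedup l).filter f
  | [] => by simp
  | x :: l => by
    by_cases hfx : f x = true
    · rw [List.filter_cons_of_pos hfx, pv_dedup_cons, pv_dedup_cons, pv_dedup_filter f l,
        List.filter_cons_of_pos hfx, List.filter_comm]
    · rw [List.filter_cons_of_neg (by simp [hfx]), pv_dedup_cons,
        List.filter_cons_of_neg (by simp [hfx]), pv_dedup_filter f l]
      have hx : x ∉ (PySem.List.dedup l).filter f := by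
        intro hmem
        exact hfx (List.of_mem_filter hmem)
      rw [List.filter_comm f (fun y => decide (y ≠ x)) (PySem.List.dedup l),
        pv_filter_ne_of_not_mem hx]

theorem pv_foldl_add_replicate (x : List Int) : ∀ (k : Nat) (s : PySem.Set (List Int)),
    x ∈ s → List.foldl PySem.Set.add s (List.replicate k x) = s
  | 0, s, _ => rfl
  | k + 1, s, h => by
    rw [List.replicate_succ, List.foldl_cons, pv_add_of_mem h]
    exact pv_foldl_add_replicate x k s h

theorem pv_dedup_replicate_cons (x : List Int) (k : Nat) (l : List (List Int)) :
    PySem.List.dedup (List.replicate (k + 1) x ++ l) = PySem.List.dedup (x :: l) := by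
  rw [pv_dedup_eq_foldl, pv_dedup_eq_foldl, List.foldl_append]
  have h1 : List.foldl PySem.Set.add ([] : PySem.Set (List Int)) (List.replicate (k + 1) x)
      = [x] := by
    rw [List.replicate_succ, List.foldl_cons, pv_add_of_not_mem (List.not_mem_nil)]
    exact pv_foldl_add_replicate x k [x] (List.mem_singleton.mpr rfl)
  have h2 : List.foldl PySem.Set.add ([] : PySem.Set (List Int)) (x :: l)
      = List.foldl PySem.Set.add [x] l := by
    simp only [List.foldl_cons]
    rw [pv_add_of_not_mem (List.not_mem_nil)]
    rfl
  rw [h1, h2]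

theorem pv_mem_dedup {x : List Int} {l : List (List Int)} :
    x ∈ PySem.List.dedup l ↔ x ∈ l := by
  rw [PySem.List.dedup_eq_ofList]
  exact PySem.Set.mem_ofList l x

-- ---------- the built graph, characterized ----------

theorem pv_mem_combos : ∀ {xs : List (List Int)} {ab : List Int × List Int},
    ab ∈ pvCombos xs → ab.1 ∈ xs ∧ ab.2 ∈ xs := by
  intro xs
  induction xs with
  | nil => intro ab h; simp [pvCombos] at h
  | cons x rest ih =>
    intro ab h
    rw [pvCombos, List.mem_append] at h
    rcases h with h | h
    · rcases List.mem_map.mp h with ⟨y, hy, he⟩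
      subst he
      exact ⟨List.mem_cons_self, List.mem_cons_of_mem x hy⟩
    · rcases ih h with ⟨h1, h2⟩
      exact ⟨List.mem_cons_of_mem x h1, List.mem_cons_of_mem x h2⟩

theorem pv_opp_append (L1 L2 : List (List Int × List Int)) (p : List Int) :
    pvOpp (L1 ++ L2) p = pvOpp L1 p ++ pvOpp L2 p := by
  simp [pvOpp]

theorem pv_flatMap_ite_singleton (f : List Int → Bool) : ∀ (xs : List (List Int)),
    (xs.flatMap (fun b => if f b then [b] else [])) = xs.filter f
  | [] => rfl
  | x :: xs => by
    rw [List.flatMap_cons, pv_flatMap_ite_singleton f xs]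
    by_cases h : f x = true
    · rw [if_pos h, List.filter_cons_of_pos h]; rfl
    · rw [if_neg h, List.filter_cons_of_neg (by simp [h]), List.nil_append]

theorem pv_flatMap_count (p x : List Int) : ∀ (xs : List (List Int)),
    (xs.flatMap (fun b => if b = p then [x] else [])) = List.replicate (xs.count p) x
  | [] => rfl
  | b :: xs => by
    rw [List.flatMap_cons, pv_flatMap_count p x xs, List.count_cons]
    by_cases h : b = p <;> simp [h, List.replicate_succ]

theorem pv_opp_block_self (p : List Int) (xs : List (List Int)) :
    pvOpp (xs.map (fun y => (p, y))) p = xs.filter (pvPred p) := by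
  rw [pvOpp, List.flatMap_map]
  have hfun : (fun a => if (p, a).1 ≠ (p, a).2 ∧ pvDistance (p, a).1 (p, a).2 ≤ 3 then
        (if (p, a).1 = p then [(p, a).2] else []) ++ (if (p, a).2 = p then [(p, a).1] else [])
      else []) = (fun a => if pvPred p a then [a] else []) := by
    funext a
    by_cases hap : a = p
    · subst hap
      simp [pvPred]
    · by_cases hd : pvDist4 p a ≤ 3
      · simp [pvPred, hap, hd, pv_dist_eq, Ne.symm]
      · have : ¬ pvDistance p a ≤ 3 := by rw [pv_dist_eq]; exact hd
        simp [pvPred, hap, hd, this]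
  rw [hfun, pv_flatMap_ite_singleton]

theorem pv_opp_block_other {x p : List Int} (hxp : x ≠ p) (xs : List (List Int)) :
    pvOpp (xs.map (fun y => (x, y))) p
      = if pvPred p x then List.replicate (xs.count p) x else [] := by
  rw [pvOpp, List.flatMap_map]
  have hfun : (fun a => if (x, a).1 ≠ (x, a).2 ∧ pvDistance (x, a).1 (x, a).2 ≤ 3 then
        (if (x, a).1 = p then [(x, a).2] else []) ++ (if (x, a).2 = p then [(x, a).1] else [])
      else []) = (fun a => if a = p then (if pvPred p x then [x] else []) else []) := by
    funext a
    by_cases hap : a = p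
    · subst hap
      by_cases hd : pvDist4 a x ≤ 3
      · have hd' : pvDistance x a ≤ 3 := by rw [pv_dist_eq, pv_dist4_comm]; exact hd
        simp [pvPred, hxp, hd, hd']
      · have hd' : ¬ pvDistance x a ≤ 3 := by rw [pv_dist_eq, pv_dist4_comm]; exact hd
        simp [pvPred, hxp, hd, hd']
    · simp [hxp, hap]
  rw [hfun]
  by_cases hpx : pvPred p x = true
  · rw [if_pos hpx]
    simp only [if_pos hpx]
    exact pv_flatMap_count p x xs
  · rw [if_neg hpx]
    simp only [if_neg hpx]
    simp

theorem pv_opp_combos_nil {p : List Int} {xs : List (List Int)} (hp : p ∉ xs) :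
    pvOpp (pvCombos xs) p = [] := by
  rw [pvOpp, List.flatMap_eq_nil_iff]
  intro ab hab
  rcases pv_mem_combos hab with ⟨h1, h2⟩
  have ha1 : ab.1 ≠ p := fun he => hp (he ▸ h1)
  have ha2 : ab.2 ≠ p := fun he => hp (he ▸ h2)
  simp [ha1, ha2]

theorem pv_mem_opp {q p : List Int} {xs : List (List Int)}
    (h : q ∈ pvOpp (pvCombos xs) p) : q ∈ xs ∧ pvPred p q = true := by
  rw [pvOpp, List.mem_flatMap] at h
  rcases h with ⟨ab, hab, hq⟩
  rcases pv_mem_combos hab with ⟨h1, h2⟩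
  by_cases hg : ab.1 ≠ ab.2 ∧ pvDistance ab.1 ab.2 ≤ 3
  · rw [if_pos hg, List.mem_append] at hq
    rcases hq with hq | hq
    · by_cases he : ab.1 = p
      · rw [if_pos he, List.mem_singleton] at hq
        subst hq
        refine ⟨h2, ?_⟩
        simp only [pvPred, Bool.and_eq_true, decide_eq_true_eq]
        refine ⟨fun hc => hg.1 (he.trans hc.symm), ?_⟩
        rw [← pv_dist_eq, ← he]
        exact hg.2
      · rw [if_neg he] at hq
        simp at hq
    · by_cases he : ab.2 = p
      · rw [if_pos he, List.mem_singleton] at hq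
        subst hq
        refine ⟨h1, ?_⟩
        simp only [pvPred, Bool.and_eq_true, decide_eq_true_eq]
        refine ⟨fun hc => hg.1 (hc.trans he.symm), ?_⟩
        rw [pv_dist4_comm, ← pv_dist_eq, ← he]
        exact hg.2
      · rw [if_neg he] at hq
        simp at hq
  · rw [if_neg hg] at hq
    simp at hq

theorem pv_G2 : ∀ (cs : List (List Int)) (p : List Int), p ∈ cs →
    PySem.List.dedup (pvOpp (pvCombos cs) p) = (PySem.List.dedup cs).filter (pvPred p) := by
  intro cs
  induction cs with
  | nil => intro p hp; cases hp
  | cons x xs ih =>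
    intro p hp
    rw [pvCombos, pv_opp_append]
    have hpredpp : pvPred p p = false := by simp [pvPred]
    by_cases hxp : x = p
    · subst hxp
      rw [pv_opp_block_self, pv_dedup_cons, List.filter_cons_of_neg (by simp [hpredpp])]
      by_cases hpx : x ∈ xs
      · have hsub : ∀ y ∈ pvOpp (pvCombos xs) x, y ∈ xs.filter (pvPred x) := by
          intro y hy
          rcases pv_mem_opp hy with ⟨hy1, hy2⟩
          exact List.mem_filter.mpr ⟨hy1, hy2⟩
        rw [pv_dedup_append_sub hsub, pv_dedup_filter]
        rw [List.filter_comm]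
        have : ∀ a ∈ (PySem.List.dedup xs).filter (pvPred x), (fun y => decide (y ≠ x)) a = true := by
          intro a ha
          have := List.of_mem_filter ha
          simp [pv_pred_ne this]
        rw [List.filter_eq_self.mpr this]
      · rw [pv_opp_combos_nil hpx, List.append_nil, pv_dedup_filter]
        rw [List.filter_comm]
        have hxd : x ∉ PySem.List.dedup xs := fun hc => hpx (pv_mem_dedup.mp hc)
        rw [pv_filter_ne_of_not_mem (fun hc => hxd (List.mem_of_mem_filter hc))]
    · have hpxs : p ∈ xs := by
        rcases List.mem_cons.mp hp with h | h
        · exact absurd h.symm hxp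
        · exact h
      rw [pv_opp_block_other hxp, pv_dedup_cons]
      by_cases hpred : pvPred p x = true
      · rw [if_pos hpred]
        obtain ⟨k, hk⟩ : ∃ k, xs.count p = k + 1 := by
          have := List.count_pos_iff.mpr hpxs
          exact ⟨xs.count p - 1, by omega⟩
        rw [hk, pv_dedup_replicate_cons, pv_dedup_cons, ih p hpxs]
        rw [List.filter_cons_of_pos hpred, List.filter_comm]
      · rw [if_neg hpred, List.nil_append, ih p hpxs,
          List.filter_cons_of_neg (by simp [hpred]), List.filter_comm]
        have hxn : x ∉ (PySem.List.dedup xs).filter (pvPred p) := by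
          intro hc
          exact hpred (List.of_mem_filter hc)
        rw [pv_filter_ne_of_not_mem hxn]

theorem pv_init_getD (p : List Int) : ∀ (cs : List (List Int))
    (g : PySem.Dict (List Int) (PySem.Set (List Int))),
    PySem.Dict.getD g p PySem.Set.empty = PySem.Set.empty →
    PySem.Dict.getD
      (cs.foldl (fun g c => PySem.Dict.insert g c PySem.Set.empty) g) p PySem.Set.empty
      = PySem.Set.empty
  | [], g, h => h
  | c :: cs, g, h => by
    rw [List.foldl_cons]
    refine pv_init_getD p cs _ ?_
    rw [PySem.Dict.getD_insert]
    by_cases hpc : p = c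
    · rw [if_pos hpc]
    · rw [if_neg hpc]; exact h

theorem pv_G1 : ∀ (L : List (List Int × List Int))
    (g : PySem.Dict (List Int) (PySem.Set (List Int))) (p : List Int),
    PySem.Dict.getD
      (L.foldl (fun g pq =>
        if pq.1 ≠ pq.2 ∧ pvDistance pq.1 pq.2 ≤ 3 then
          PySem.Dict.modify
            (PySem.Dict.modify g pq.1 PySem.Set.empty (fun s => PySem.Set.add s pq.2))
            pq.2 PySem.Set.empty (fun s => PySem.Set.add s pq.1)
        else g) g) p PySem.Set.empty
      = PySem.Set.update (PySem.Dict.getD g p PySem.Set.empty) (pvOpp L p)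
  | [], g, p => by simp [pvOpp, PySem.Set.update]
  | ab :: L, g, p => by
    rw [List.foldl_cons]
    have hopp : pvOpp (ab :: L) p
        = (if ab.1 ≠ ab.2 ∧ pvDistance ab.1 ab.2 ≤ 3 then
            (if ab.1 = p then [ab.2] else []) ++ (if ab.2 = p then [ab.1] else [])
          else []) ++ pvOpp L p := by
      rw [pvOpp, List.flatMap_cons]; rfl
    rw [hopp]
    have hupd : ∀ (s : PySem.Set (List Int)) (l1 l2 : List (List Int)),
        PySem.Set.update s (l1 ++ l2) = PySem.Set.update (PySem.Set.update s l1) l2 := by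
      intro s l1 l2
      simp [PySem.Set.update, List.foldl_append]
    rw [hupd]
    by_cases hg : ab.1 ≠ ab.2 ∧ pvDistance ab.1 ab.2 ≤ 3
    · rw [if_pos hg, if_pos hg, pv_G1 L _ p]
      congr 1
      by_cases h1 : ab.1 = p
      · have h2 : ab.2 ≠ p := fun hc => hg.1 (h1.trans hc.symm)
        rw [if_pos h1, if_neg h2, List.append_nil]
        rw [PySem.Dict.getD_modify, if_neg (fun hc : p = ab.2 => h2 hc.symm),
          PySem.Dict.getD_modify, if_pos h1.symm, h1]
        rfl
      · rw [if_neg h1]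
        by_cases h2 : ab.2 = p
        · rw [if_pos h2, List.nil_append]
          rw [PySem.Dict.getD_modify, if_pos h2.symm,
            PySem.Dict.getD_modify, if_neg (fun hc : ab.2 = ab.1 => hg.1 hc.symm), h2]
          rfl
        · rw [if_neg h2, List.nil_append]
          rw [PySem.Dict.getD_modify, if_neg (fun hc : p = ab.2 => h2 hc.symm),
            PySem.Dict.getD_modify, if_neg (fun hc : p = ab.1 => h1 hc.symm)]
          rfl
    · rw [if_neg hg, if_neg hg, pv_G1 L g p]
      rfl

theorem pv_graph_getD {cs : List (List Int)} {p : List Int} (hp : p ∈ cs) :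
    PySem.Dict.getD (pvBuildGraph cs) p PySem.Set.empty
      = pvNb (PySem.List.dedup cs) p := by
  rw [pvBuildGraph]
  rw [pv_G1]
  rw [pv_init_getD p cs PySem.Dict.empty (by simp [PySem.Dict.getD_empty])]
  have : PySem.Set.update (PySem.Set.empty : PySem.Set (List Int)) (pvOpp (pvCombos cs) p)
      = PySem.List.dedup (pvOpp (pvCombos cs) p) := by
    rw [PySem.List.dedup_eq_ofList, ← PySem.Set.update_nil_left]
    rfl
  rw [this, pv_G2 cs p hp]
  rfl

-- ---------- DFS machinery: the reference traversal ----------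

theorem pv_filter_len_mono {l : List (List Int)} {p q : List Int → Bool}
    (h : ∀ a ∈ l, p a = true → q a = true) : (l.filter p).length ≤ (l.filter q).length := by
  induction l with
  | nil => simp
  | cons x l ih =>
    have ih' := ih (fun a ha hp => h a (List.mem_cons_of_mem x ha) hp)
    by_cases hp : p x = true
    · rw [List.filter_cons_of_pos hp, List.filter_cons_of_pos (h x List.mem_cons_self hp)]
      simpa using ih'
    · rw [List.filter_cons_of_neg (by simp [hp])]
      by_cases hq : q x = true
      · rw [List.filter_cons_of_pos hq]
        simp only [List.length_cons]
        omega
      · rw [List.filter_cons_of_neg (by simp [hq])]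
        exact ih'

theorem pv_m_mono {U s s' : List (List Int)} (h : ∀ x ∈ s, x ∈ s') :
    pvM U s' ≤ pvM U s := by
  refine pv_filter_len_mono ?_
  intro a _ ha
  simp only [decide_eq_true_eq] at ha ⊢
  exact fun hc => ha (h a hc)

theorem pv_m_add_not_mem {U seen : List (List Int)} {p : List Int} (hp : p ∉ U) :
    pvM U (PySem.Set.add seen p) = pvM U seen := by
  unfold pvM
  refine congrArg List.length (List.filter_congr ?_)
  intro a ha
  have hap : a ≠ p := fun he => hp (he ▸ ha)
  simp only [PySem.Set.mem_add]
  by_cases h : a ∈ seen <;> simp [h, hap]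

theorem pv_m_add : ∀ (U : List (List Int)) (seen : PySem.Set (List Int)) (p : List Int),
    U.Nodup → p ∈ U → p ∉ seen → pvM U (PySem.Set.add seen p) + 1 = pvM U seen
  | [], _, _, _, hpU, _ => absurd hpU (List.not_mem_nil)
  | x :: U, seen, p, hU, hpU, hps => by
    have hU' : U.Nodup := hU.of_cons
    have hxU : x ∉ U := (List.nodup_cons.mp hU).1
    rcases List.mem_cons.mp hpU with rfl | hx
    · unfold pvM
      rw [List.filter_cons_of_neg (by simp [PySem.Set.mem_add]),
        List.filter_cons_of_pos (by simp [hps])]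
      simp only [List.length_cons]
      have h2 := pv_m_add_not_mem (seen := seen) (p := p) hxU
      unfold pvM at h2
      omega
    · have hxp : x ≠ p := fun he => hxU (he ▸ hx)
      have ih := pv_m_add U seen p hU' hx hps
      unfold pvM at ih ⊢
      by_cases hxs : x ∈ seen
      · rw [List.filter_cons_of_neg (by simp [PySem.Set.mem_add, hxs]),
          List.filter_cons_of_neg (by simp [hxs])]
        omega
      · rw [List.filter_cons_of_pos (by simp [PySem.Set.mem_add, hxs, hxp]),
          List.filter_cons_of_pos (by simp [hxs])]
        simp only [List.length_cons]
        omega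

theorem pv_rank_cons (U seen : List (List Int)) (p : List Int) (st : List (List Int)) :
    pvRank U seen (p :: st) = pvM U seen * (U.length + 1) + st.length + 1 := by
  simp only [pvRank, List.length_cons]
  omega

theorem pv_trav_mono (nb : List Int → List (List Int)) (U : List (List Int))
    (hnb : ∀ q x, x ∈ nb q → x ∈ U) :
    ∀ (fuel : Nat) (seen : PySem.Set (List Int)) (st : List (List Int)),
      (∀ x ∈ st, x ∈ U) →
      (∀ a ∈ seen, a ∈ (pvTrav nb fuel seen st).2) ∧
      (∀ a ∈ (pvTrav nb fuel seen st).2, a ∈ seen ∨ a ∈ U)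
  | fuel, seen, [], _ => by
    simp only [pvTrav]
    exact ⟨fun a ha => ha, fun a ha => Or.inl ha⟩
  | 0, seen, p :: st, _ => by
    simp only [pvTrav]
    exact ⟨fun a ha => ha, fun a ha => Or.inl ha⟩
  | fuel + 1, seen, p :: st, hst => by
    simp only [pvTrav]
    by_cases hp : p ∈ seen
    · rw [if_pos hp]
      exact pv_trav_mono nb U hnb fuel seen st (fun x hx => hst x (List.mem_cons_of_mem p hx))
    · rw [if_neg hp]
      have hpU : p ∈ U := hst p List.mem_cons_self
      have h1 := pv_trav_mono nb U hnb fuel (PySem.Set.add seen p) (nb p)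
        (fun x hx => hnb p x hx)
      have h2 := pv_trav_mono nb U hnb fuel
        (pvTrav nb fuel (PySem.Set.add seen p) (nb p)).2 st
        (fun x hx => hst x (List.mem_cons_of_mem p hx))
      refine ⟨?_, ?_⟩
      · intro a ha
        exact h2.1 a (h1.1 a ((PySem.Set.mem_add seen p a).mpr (Or.inl ha)))
      · intro a ha
        rcases h2.2 a ha with h | h
        · rcases h1.2 a h with h' | h'
          · rcases (PySem.Set.mem_add seen p a).mp h' with h'' | h''
            · exact Or.inl h''
            · exact Or.inr (h'' ▸ hpU)
          · exact Or.inr h'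
        · exact Or.inr h

theorem pv_trav_fuel (nb : List Int → List (List Int)) (U : List (List Int))
    (hU : U.Nodup) (hnb : ∀ q x, x ∈ nb q → x ∈ U)
    (hnbl : ∀ q, (nb q).length ≤ U.length) :
    ∀ (k : Nat), ∀ (fuel1 fuel2 : Nat) (seen : PySem.Set (List Int)) (st : List (List Int)),
      (∀ x ∈ st, x ∈ U) → pvRank U seen st ≤ k → k < fuel1 → k < fuel2 →
      pvTrav nb fuel1 seen st = pvTrav nb fuel2 seen st := by
  intro k
  induction k using Nat.strong_induction_on with
  | _ k IH =>
  intro fuel1 fuel2 seen st hst hrank hf1 hf2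
  cases st with
  | nil => simp only [pvTrav]
  | cons p st =>
    have hrk1 : 1 ≤ pvRank U seen (p :: st) := by
      rw [pv_rank_cons]; omega
    cases fuel1 with
    | zero => omega
    | succ f1 =>
      cases fuel2 with
      | zero => omega
      | succ f2 =>
        have hpU : p ∈ U := hst p List.mem_cons_self
        have hstt : ∀ x ∈ st, x ∈ U := fun x hx => hst x (List.mem_cons_of_mem p hx)
        simp only [pvTrav]
        by_cases hp : p ∈ seen
        · rw [if_pos hp, if_pos hp]
          refine IH (k - 1) (by omega) f1 f2 seen st hstt ?_ (by omega) (by omega)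
          rw [pv_rank_cons] at hrank
          simp only [pvRank]
          omega
        · rw [if_neg hp, if_neg hp]
          have hm := pv_m_add U seen p hU hpU hp
          have h0 : pvRank U seen (p :: st)
              = pvM U (PySem.Set.add seen p) * (U.length + 1) + (U.length + 1)
                + st.length + 1 := by
            rw [pv_rank_cons, ← hm]
            ring
          have h1' : pvRank U (PySem.Set.add seen p) (nb p)
              = pvM U (PySem.Set.add seen p) * (U.length + 1) + (nb p).length := by
            simp [pvRank]
          have hnbp := hnbl p
          have hEq1 : pvTrav nb f1 (PySem.Set.add seen p) (nb p)
              = pvTrav nb f2 (PySem.Set.add seen p) (nb p) := by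
            refine IH (k - 2) (by omega) f1 f2 _ _ (fun x hx => hnb p x hx) ?_
              (by omega) (by omega)
            generalize hG : pvM U (PySem.Set.add seen p) * (U.length + 1) = G at h0 h1'
            omega
          rw [hEq1]
          have hsub : ∀ a ∈ PySem.Set.add seen p,
              a ∈ (pvTrav nb f2 (PySem.Set.add seen p) (nb p)).2 :=
            (pv_trav_mono nb U hnb f2 _ _ (fun x hx => hnb p x hx)).1
          have hmr : pvM U (pvTrav nb f2 (PySem.Set.add seen p) (nb p)).2
              ≤ pvM U (PySem.Set.add seen p) := pv_m_mono hsub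
          have hEq2 : pvTrav nb f1 (pvTrav nb f2 (PySem.Set.add seen p) (nb p)).2 st
              = pvTrav nb f2 (pvTrav nb f2 (PySem.Set.add seen p) (nb p)).2 st := by
            refine IH (k - 1) (by omega) f1 f2 _ _ hstt ?_ (by omega) (by omega)
            have hmul : pvM U (pvTrav nb f2 (PySem.Set.add seen p) (nb p)).2 * (U.length + 1)
                ≤ pvM U (PySem.Set.add seen p) * (U.length + 1) :=
              Nat.mul_le_mul_right _ hmr
            simp only [pvRank]
            generalize hG : pvM U (PySem.Set.add seen p) * (U.length + 1) = G at h0 hmul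
            generalize hG2 : pvM U (pvTrav nb f2 (PySem.Set.add seen p) (nb p)).2
              * (U.length + 1) = G2 at hmul ⊢
            omega
          rw [hEq2]

theorem pv_trav_append (nb : List Int → List (List Int)) (U : List (List Int))
    (hU : U.Nodup) (hnb : ∀ q x, x ∈ nb q → x ∈ U)
    (hnbl : ∀ q, (nb q).length ≤ U.length) :
    ∀ (k : Nat), ∀ (fuel : Nat) (seen : PySem.Set (List Int)) (l st : List (List Int)),
      (∀ x ∈ l, x ∈ U) → (∀ x ∈ st, x ∈ U) →
      pvRank U seen (l ++ st) ≤ k → k < fuel →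
      pvTrav nb fuel seen (l ++ st)
        = ((pvTrav nb fuel seen l).1
            ++ (pvTrav nb fuel (pvTrav nb fuel seen l).2 st).1,
           (pvTrav nb fuel (pvTrav nb fuel seen l).2 st).2) := by
  intro k
  induction k using Nat.strong_induction_on with
  | _ k IH =>
  intro fuel seen l st hl hst hrank hf
  cases l with
  | nil => simp only [List.nil_append, pvTrav]
  | cons p l =>
    rw [List.cons_append] at hrank ⊢
    cases fuel with
    | zero =>
      have : 1 ≤ pvRank U seen (p :: (l ++ st)) := by rw [pv_rank_cons]; omega
      omega
    | succ f =>
      have hpU : p ∈ U := hl p List.mem_cons_self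
      have hlt : ∀ x ∈ l, x ∈ U := fun x hx => hl x (List.mem_cons_of_mem p hx)
      simp only [pvTrav]
      by_cases hp : p ∈ seen
      · rw [if_pos hp, if_pos hp]
        have h0 : pvM U seen * (U.length + 1) + l.length + st.length + 1 ≤ k := by
          rw [pv_rank_cons] at hrank
          simp only [List.length_append] at hrank
          omega
        have hr : pvRank U seen (l ++ st) ≤ k - 1 := by
          simp only [pvRank, List.length_append]
          omega
        rw [IH (k - 1) (by omega) f seen l st hlt hst hr (by omega)]
        have hmul : pvM U (pvTrav nb f seen l).2 * (U.length + 1)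
            ≤ pvM U seen * (U.length + 1) :=
          Nat.mul_le_mul_right _ (pv_m_mono (pv_trav_mono nb U hnb f seen l hlt).1)
        have hEqt : pvTrav nb (f + 1) (pvTrav nb f seen l).2 st
            = pvTrav nb f (pvTrav nb f seen l).2 st :=
          pv_trav_fuel nb U hU hnb hnbl (k - 1) (f + 1) f _ st hst
            (by simp only [pvRank]; omega) (by omega) (by omega)
        rw [hEqt]
      · rw [if_neg hp, if_neg hp]
        have hm := pv_m_add U seen p hU hpU hp
        have hnbp := hnbl p
        have h0 : pvM U (PySem.Set.add seen p) * (U.length + 1) + (U.length + 1)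
            + l.length + st.length + 1 ≤ k := by
          rw [pv_rank_cons] at hrank
          simp only [List.length_append] at hrank
          have hx : (pvM U (PySem.Set.add seen p) + 1) * (U.length + 1)
              = pvM U (PySem.Set.add seen p) * (U.length + 1) + (U.length + 1) := by ring
          rw [← hm, hx] at hrank
          omega
        have hmul1 : pvM U (pvTrav nb f (PySem.Set.add seen p) (nb p)).2 * (U.length + 1)
            ≤ pvM U (PySem.Set.add seen p) * (U.length + 1) :=
          Nat.mul_le_mul_right _ (pv_m_mono
            (pv_trav_mono nb U hnb f _ _ (fun x hx => hnb p x hx)).1)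
        have hr2 : pvRank U (pvTrav nb f (PySem.Set.add seen p) (nb p)).2 (l ++ st)
            ≤ k - 1 := by
          simp only [pvRank, List.length_append]
          omega
        rw [IH (k - 1) (by omega) f _ l st hlt hst hr2 (by omega)]
        have hmul2 : pvM U (pvTrav nb f (pvTrav nb f (PySem.Set.add seen p) (nb p)).2 l).2
              * (U.length + 1)
            ≤ pvM U (pvTrav nb f (PySem.Set.add seen p) (nb p)).2 * (U.length + 1) :=
          Nat.mul_le_mul_right _ (pv_m_mono
            (pv_trav_mono nb U hnb f _ l hlt).1)
        have hEqt : pvTrav nb (f + 1)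
              (pvTrav nb f (pvTrav nb f (PySem.Set.add seen p) (nb p)).2 l).2 st
            = pvTrav nb f
              (pvTrav nb f (pvTrav nb f (PySem.Set.add seen p) (nb p)).2 l).2 st :=
          pv_trav_fuel nb U hU hnb hnbl (k - 1) (f + 1) f _ st hst
            (by simp only [pvRank]; omega) (by omega) (by omega)
        rw [hEqt]
        simp only [List.cons_append, List.append_assoc]

-- ---------- port A's recursive DFS equals the reference traversal ----------

theorem pv_U_nodup (cs : List (List Int)) : (PySem.List.dedup cs).Nodup := by
  rw [PySem.List.dedup_eq_ofList]
  exact PySem.Set.nodup_ofList cs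

theorem pv_nb_mem {U : List (List Int)} : ∀ (q x : List Int), x ∈ pvNb U q → x ∈ U :=
  fun _ _ hx => (List.mem_filter.mp hx).1

theorem pv_nb_len {U : List (List Int)} : ∀ (q : List Int), (pvNb U q).length ≤ U.length :=
  fun _ => List.length_filter_le _ _

theorem pv_master (cs : List (List Int)) :
    ∀ (k : Nat) (l : List (List Int)) (acc : List (List Int)) (w : PySem.Set (List Int))
      (fuel F : Nat),
      (∀ x ∈ l, x ∈ PySem.List.dedup cs) → pvM (PySem.List.dedup cs) w ≤ k → k ≤ fuel →
      pvRank (PySem.List.dedup cs) w l < F →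
      l.foldl (fun r s =>
          if s ∈ r.2 then r
          else
            let rec2 := pvFindAll (pvBuildGraph cs) fuel s (PySem.Set.add r.2 s)
            (r.1 ++ s :: rec2.1, rec2.2)) (acc, w)
        = (acc ++ (pvTrav (pvNb (PySem.List.dedup cs)) F w l).1,
           (pvTrav (pvNb (PySem.List.dedup cs)) F w l).2) := by
  intro k
  induction k using Nat.strong_induction_on with
  | _ k IH =>
  intro l
  induction l with
  | nil =>
    intro acc w fuel F _ _ _ _
    simp [pvTrav]
  | cons s l ihl =>
    intro acc w fuel F hl hmw hkf hF
    have hsU : s ∈ PySem.List.dedup cs := hl s List.mem_cons_self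
    have hlt : ∀ x ∈ l, x ∈ PySem.List.dedup cs := fun x hx => hl x (List.mem_cons_of_mem s hx)
    have hbody : (if s ∈ (acc, w).2 then (acc, w)
          else
            let rec2 := pvFindAll (pvBuildGraph cs) fuel s ((acc, w).2.add s)
            ((acc, w).1 ++ s :: rec2.1, rec2.2))
        = (if s ∈ w then (acc, w)
          else (acc ++ s :: (pvFindAll (pvBuildGraph cs) fuel s (PySem.Set.add w s)).1,
            (pvFindAll (pvBuildGraph cs) fuel s (PySem.Set.add w s)).2)) := rfl
    rw [List.foldl_cons, hbody]
    cases F with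
    | zero => omega
    | succ F' =>
      have hF'rank : pvM (PySem.List.dedup cs) w * ((PySem.List.dedup cs).length + 1)
          + l.length + 1 ≤ F' := by
        rw [pv_rank_cons] at hF
        omega
      simp only [pvTrav]
      by_cases hs : s ∈ w
      · rw [if_pos hs, if_pos hs]
        refine ihl acc w fuel F' hlt hmw hkf ?_
        simp only [pvRank]
        omega
      · rw [if_neg hs, if_neg hs]
        have hm1 := pv_m_add (PySem.List.dedup cs) w s (pv_U_nodup cs) hsU hs
        have hk1 : 1 ≤ k := by omega
        cases fuel with
        | zero => omega
        | succ fl =>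
          have haddidem : PySem.Set.add (PySem.Set.add w s) s = PySem.Set.add w s :=
            pv_add_of_mem ((PySem.Set.mem_add w s s).mpr (Or.inr rfl))
          have hgetD := pv_graph_getD (pv_mem_dedup.mp hsU)
          have hFA : pvFindAll (pvBuildGraph cs) (fl + 1) s (PySem.Set.add w s)
              = ((pvTrav (pvNb (PySem.List.dedup cs))
                    (pvRank (PySem.List.dedup cs) (PySem.Set.add w s)
                      (pvNb (PySem.List.dedup cs) s) + 1)
                    (PySem.Set.add w s) (pvNb (PySem.List.dedup cs) s)).1,
                 (pvTrav (pvNb (PySem.List.dedup cs))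
                    (pvRank (PySem.List.dedup cs) (PySem.Set.add w s)
                      (pvNb (PySem.List.dedup cs) s) + 1)
                    (PySem.Set.add w s) (pvNb (PySem.List.dedup cs) s)).2) := by
            simp only [pvFindAll]
            rw [haddidem, hgetD]
            have := IH (k - 1) (by omega) (pvNb (PySem.List.dedup cs) s) []
              (PySem.Set.add w s) fl
              (pvRank (PySem.List.dedup cs) (PySem.Set.add w s)
                (pvNb (PySem.List.dedup cs) s) + 1)
              (fun x hx => pv_nb_mem _ x hx) (by omega) (by omega) (by omega)
            rw [this, List.nil_append]
          rw [hFA]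
          -- continue the fold over l
          have hmono := (pv_trav_mono (pvNb (PySem.List.dedup cs)) (PySem.List.dedup cs)
            pv_nb_mem
            (pvRank (PySem.List.dedup cs) (PySem.Set.add w s)
              (pvNb (PySem.List.dedup cs) s) + 1)
            (PySem.Set.add w s) (pvNb (PySem.List.dedup cs) s)
            (fun x hx => pv_nb_mem _ x hx)).1
          have hmr : pvM (PySem.List.dedup cs)
              (pvTrav (pvNb (PySem.List.dedup cs))
                (pvRank (PySem.List.dedup cs) (PySem.Set.add w s)
                  (pvNb (PySem.List.dedup cs) s) + 1)
                (PySem.Set.add w s) (pvNb (PySem.List.dedup cs) s)).2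
              ≤ pvM (PySem.List.dedup cs) (PySem.Set.add w s) := pv_m_mono hmono
          have hmul : pvM (PySem.List.dedup cs)
              (pvTrav (pvNb (PySem.List.dedup cs))
                (pvRank (PySem.List.dedup cs) (PySem.Set.add w s)
                  (pvNb (PySem.List.dedup cs) s) + 1)
                (PySem.Set.add w s) (pvNb (PySem.List.dedup cs) s)).2
                * ((PySem.List.dedup cs).length + 1)
              ≤ pvM (PySem.List.dedup cs) (PySem.Set.add w s)
                * ((PySem.List.dedup cs).length + 1) := Nat.mul_le_mul_right _ hmr
          have hlink : pvM (PySem.List.dedup cs) w * ((PySem.List.dedup cs).length + 1)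
              = pvM (PySem.List.dedup cs) (PySem.Set.add w s)
                  * ((PySem.List.dedup cs).length + 1)
                + ((PySem.List.dedup cs).length + 1) := by
            rw [← hm1]
            ring
          have hF'2 : pvRank (PySem.List.dedup cs)
              (pvTrav (pvNb (PySem.List.dedup cs))
                (pvRank (PySem.List.dedup cs) (PySem.Set.add w s)
                  (pvNb (PySem.List.dedup cs) s) + 1)
                (PySem.Set.add w s) (pvNb (PySem.List.dedup cs) s)).2 l < F' := by
            have hrw : pvRank (PySem.List.dedup cs)
                (pvTrav (pvNb (PySem.List.dedup cs))
                  (pvRank (PySem.List.dedup cs) (PySem.Set.add w s)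
                    (pvNb (PySem.List.dedup cs) s) + 1)
                  (PySem.Set.add w s) (pvNb (PySem.List.dedup cs) s)).2 l
                = pvM (PySem.List.dedup cs)
                    (pvTrav (pvNb (PySem.List.dedup cs))
                      (pvRank (PySem.List.dedup cs) (PySem.Set.add w s)
                        (pvNb (PySem.List.dedup cs) s) + 1)
                      (PySem.Set.add w s) (pvNb (PySem.List.dedup cs) s)).2
                    * ((PySem.List.dedup cs).length + 1)
                  + l.length := rfl
            rw [hrw]
            omega
          rw [ihl _ _ (fl + 1) F' hlt (by omega) (by omega) hF'2]
          have hTI : pvTrav (pvNb (PySem.List.dedup cs))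
                (pvRank (PySem.List.dedup cs) (PySem.Set.add w s)
                  (pvNb (PySem.List.dedup cs) s) + 1)
                (PySem.Set.add w s) (pvNb (PySem.List.dedup cs) s)
              = pvTrav (pvNb (PySem.List.dedup cs)) F'
                (PySem.Set.add w s) (pvNb (PySem.List.dedup cs) s) := by
            refine pv_trav_fuel (pvNb (PySem.List.dedup cs)) (PySem.List.dedup cs)
              (pv_U_nodup cs) pv_nb_mem pv_nb_len
              (pvRank (PySem.List.dedup cs) (PySem.Set.add w s)
                (pvNb (PySem.List.dedup cs) s))
              _ _ _ _ (fun x hx => pv_nb_mem _ x hx) (le_refl _) (by omega) ?_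
            have hnbl := pv_nb_len (U := PySem.List.dedup cs) s
            have hrw2 : pvRank (PySem.List.dedup cs) (PySem.Set.add w s)
                (pvNb (PySem.List.dedup cs) s)
                = pvM (PySem.List.dedup cs) (PySem.Set.add w s)
                    * ((PySem.List.dedup cs).length + 1)
                  + (pvNb (PySem.List.dedup cs) s).length := rfl
            rw [hrw2]
            omega
          rw [hTI]
          simp only [List.cons_append, List.append_assoc]

theorem pv_findAll_eq (cs : List (List Int)) (p : List Int) (hp : p ∈ PySem.List.dedup cs)
    {fuel F : Nat} (hfuel : pvM (PySem.List.dedup cs) PySem.Set.empty < fuel)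
    (hF : pvRank (PySem.List.dedup cs) (PySem.Set.add PySem.Set.empty p)
      (pvNb (PySem.List.dedup cs) p) < F) :
    pvFindAll (pvBuildGraph cs) fuel p PySem.Set.empty
      = ((pvTrav (pvNb (PySem.List.dedup cs)) F
            (PySem.Set.add PySem.Set.empty p) (pvNb (PySem.List.dedup cs) p)).1,
         (pvTrav (pvNb (PySem.List.dedup cs)) F
            (PySem.Set.add PySem.Set.empty p) (pvNb (PySem.List.dedup cs) p)).2) := by
  cases fuel with
  | zero => omega
  | succ fl =>
    simp only [pvFindAll]
    rw [pv_graph_getD (pv_mem_dedup.mp hp)]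
    have hm1 := pv_m_add (PySem.List.dedup cs) PySem.Set.empty p (pv_U_nodup cs) hp
      (List.not_mem_nil)
    have := pv_master cs (pvM (PySem.List.dedup cs) PySem.Set.empty - 1)
      (pvNb (PySem.List.dedup cs) p) [] (PySem.Set.add PySem.Set.empty p) fl F
      (fun x hx => pv_nb_mem _ x hx) (by omega) (by omega) hF
    rw [this, List.nil_append]

-- ---------- port B's stack loop equals the reference traversal ----------

theorem pv_flood_eq (cs : List (List Int)) :
    ∀ (k : Nat) (fuel F : Nat) (labels : PySem.Dict (List Int) Int)
      (seen : PySem.Set (List Int)) (st : List (List Int)) (index : Int),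
      (∀ x ∈ st, x ∈ PySem.List.dedup cs) →
      pvRank (PySem.List.dedup cs) seen st ≤ k → k < fuel →
      pvRank (PySem.List.dedup cs) seen st < F →
      pvFlood (PySem.List.dedup cs) index fuel labels seen st
        = ((pvTrav (pvNb (PySem.List.dedup cs)) F seen st).1.foldl
            (fun d x => PySem.Dict.insert d x index) labels,
           (pvTrav (pvNb (PySem.List.dedup cs)) F seen st).2) := by
  intro k
  induction k using Nat.strong_induction_on with
  | _ k IH =>
  intro fuel F labels seen st index hst hrank hkf hF
  cases st with
  | nil => simp [pvFlood, pvTrav]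
  | cons p rest =>
    have hrk1 : 1 ≤ pvRank (PySem.List.dedup cs) seen (p :: rest) := by
      rw [pv_rank_cons]; omega
    cases fuel with
    | zero => omega
    | succ f =>
      cases F with
      | zero => omega
      | succ F' =>
        have hpU : p ∈ PySem.List.dedup cs := hst p List.mem_cons_self
        have hrest : ∀ x ∈ rest, x ∈ PySem.List.dedup cs :=
          fun x hx => hst x (List.mem_cons_of_mem p hx)
        simp only [pvFlood, pvTrav]
        by_cases hp : p ∈ seen
        · rw [if_pos hp, if_pos hp]
          refine IH (k - 1) (by omega) f F' labels seen rest index hrest ?_ (by omega) ?_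
          · rw [pv_rank_cons] at hrank
            simp only [pvRank]
            omega
          · rw [pv_rank_cons] at hF
            simp only [pvRank]
            omega
        · rw [if_neg hp, if_neg hp]
          have hfilt : (PySem.List.dedup cs).filter
              (fun q => decide (q ≠ p) && decide (pvDist4 p q ≤ 3))
              = pvNb (PySem.List.dedup cs) p := rfl
          rw [hfilt]
          have hm1 := pv_m_add (PySem.List.dedup cs) seen p (pv_U_nodup cs) hpU hp
          have hexp : (pvM (PySem.List.dedup cs) (PySem.Set.add seen p) + 1)
                * ((PySem.List.dedup cs).length + 1)
              = pvM (PySem.List.dedup cs) (PySem.Set.add seen p)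
                  * ((PySem.List.dedup cs).length + 1)
                + ((PySem.List.dedup cs).length + 1) := by ring
          have hnbl := pv_nb_len (U := PySem.List.dedup cs) p
          have hrank' : pvM (PySem.List.dedup cs) (PySem.Set.add seen p)
                * ((PySem.List.dedup cs).length + 1)
              + ((PySem.List.dedup cs).length + 1) + rest.length + 1
              ≤ k := by
            rw [pv_rank_cons, ← hm1, hexp] at hrank
            omega
          have hF'' : pvM (PySem.List.dedup cs) (PySem.Set.add seen p)
                * ((PySem.List.dedup cs).length + 1)
              + ((PySem.List.dedup cs).length + 1) + rest.length + 1
              ≤ F' := by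
            rw [pv_rank_cons, ← hm1, hexp] at hF
            omega
          have happrank : pvRank (PySem.List.dedup cs) (PySem.Set.add seen p)
              (pvNb (PySem.List.dedup cs) p ++ rest) ≤ k - 1 := by
            simp only [pvRank, List.length_append]
            omega
          rw [IH (k - 1) (by omega) f F' (PySem.Dict.insert labels p index)
            (PySem.Set.add seen p) (pvNb (PySem.List.dedup cs) p ++ rest) index
            (by
              intro x hx
              rcases List.mem_append.mp hx with h | h
              · exact pv_nb_mem _ x h
              · exact hrest x h)
            happrank (by omega)
            (by
              simp only [pvRank, List.length_append]
              omega)]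
          rw [pv_trav_append (pvNb (PySem.List.dedup cs)) (PySem.List.dedup cs)
            (pv_U_nodup cs) pv_nb_mem pv_nb_len
            (pvRank (PySem.List.dedup cs) (PySem.Set.add seen p)
              (pvNb (PySem.List.dedup cs) p ++ rest))
            F' (PySem.Set.add seen p) (pvNb (PySem.List.dedup cs) p) rest
            (fun x hx => pv_nb_mem _ x hx) hrest (le_refl _)
            (by
              simp only [pvRank, List.length_append] at *
              omega)]
          rw [List.foldl_cons, List.foldl_append]

-- ---------- outer loops ----------

def pvStepA (cs : List (List Int)) (st : PySem.Dict (List Int) Int × Int) (c : List Int) :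
    PySem.Dict (List Int) Int × Int :=
  if PySem.Dict.contains st.1 c then st
  else
    let cons := PySem.Dict.insert st.1 c st.2
    let r := pvFindAll (pvBuildGraph cs) (cs.length + 1) c PySem.Set.empty
    (r.1.foldl (fun d x => PySem.Dict.insert d x st.2) cons, st.2 + 1)

def pvStepB (cs : List (List Int)) (st : PySem.Dict (List Int) Int × Int) (c : List Int) :
    PySem.Dict (List Int) Int × Int :=
  if PySem.Dict.contains st.1 c then st
  else
    ((pvFlood (PySem.List.dedup cs) st.2
        (((PySem.List.dedup cs).length + 1) * ((PySem.List.dedup cs).length + 1)) st.1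
        PySem.Set.empty [c]).1, st.2 + 1)

theorem pvA_eq_fold (cs : List (List Int)) :
    assign_constelations cs = (cs.foldl (pvStepA cs) (PySem.Dict.empty, 0)).1.items := rfl

theorem pvB_eq_fold (cs : List (List Int)) :
    assign_constelations_alt cs
      = ((PySem.List.dedup cs).foldl (pvStepB cs) (PySem.Dict.empty, 0)).1.items := rfl

theorem pv_stepA_skip (cs : List (List Int)) (st : PySem.Dict (List Int) Int × Int)
    (c : List Int) (h : c ∈ st.1.keys) : pvStepA cs st c = st := by
  unfold pvStepA
  rw [if_pos ((PySem.Dict.contains_iff_mem_keys st.1 c).mpr h)]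

theorem pv_stepA_keys (cs : List (List Int)) (st : PySem.Dict (List Int) Int × Int)
    (c x : List Int) (h : x ∈ st.1.keys) : x ∈ (pvStepA cs st c).1.keys := by
  unfold pvStepA
  by_cases hc : PySem.Dict.contains st.1 c = true
  · rw [if_pos hc]
    exact h
  · rw [if_neg hc]
    show x ∈ ((pvFindAll (pvBuildGraph cs) (cs.length + 1) c PySem.Set.empty).1.foldl
      (fun d x => PySem.Dict.insert d x st.2) (PySem.Dict.insert st.1 c st.2)).keys
    rw [PySem.Dict.keys_foldl_insert _ (fun _ _ => st.2)]
    exact (PySem.Set.mem_update _ _ x).mpr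
      (Or.inl ((PySem.Dict.mem_keys_insert st.1 c x st.2).mpr (Or.inr h)))

theorem pv_stepA_self (cs : List (List Int)) (st : PySem.Dict (List Int) Int × Int)
    (c : List Int) : c ∈ (pvStepA cs st c).1.keys := by
  unfold pvStepA
  by_cases hc : PySem.Dict.contains st.1 c = true
  · rw [if_pos hc]
    exact (PySem.Dict.contains_iff_mem_keys st.1 c).mp hc
  · rw [if_neg hc]
    show c ∈ ((pvFindAll (pvBuildGraph cs) (cs.length + 1) c PySem.Set.empty).1.foldl
      (fun d x => PySem.Dict.insert d x st.2) (PySem.Dict.insert st.1 c st.2)).keys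
    rw [PySem.Dict.keys_foldl_insert _ (fun _ _ => st.2)]
    exact (PySem.Set.mem_update _ _ c).mpr
      (Or.inl ((PySem.Dict.mem_keys_insert st.1 c c st.2).mpr (Or.inl rfl)))

theorem pv_foldA_filter (cs : List (List Int)) (c : List Int) : ∀ (l : List (List Int))
    (st : PySem.Dict (List Int) Int × Int), c ∈ st.1.keys →
    l.foldl (pvStepA cs) st = (l.filter (fun y => decide (y ≠ c))).foldl (pvStepA cs) st
  | [], _, _ => rfl
  | x :: l, st, h => by
    by_cases hxc : x = c
    · subst hxc
      rw [List.filter_cons_of_neg (by simp), List.foldl_cons, pv_stepA_skip cs st x h]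
      exact pv_foldA_filter cs x l st h
    · rw [List.filter_cons_of_pos (by simp [hxc]), List.foldl_cons, List.foldl_cons]
      exact pv_foldA_filter cs c l (pvStepA cs st x) (pv_stepA_keys cs st x c h)

theorem pv_foldA_dedup (cs : List (List Int)) : ∀ (l : List (List Int))
    (st : PySem.Dict (List Int) Int × Int),
    l.foldl (pvStepA cs) st = (PySem.List.dedup l).foldl (pvStepA cs) st
  | [], _ => rfl
  | x :: l, st => by
    rw [List.foldl_cons, pv_dedup_cons, List.foldl_cons,
      pv_foldA_dedup cs l (pvStepA cs st x),
      pv_foldA_filter cs x (PySem.List.dedup l) (pvStepA cs st x) (pv_stepA_self cs st x)]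

theorem pv_step_eq (cs : List (List Int)) (st : PySem.Dict (List Int) Int × Int)
    (c : List Int) (hc : c ∈ PySem.List.dedup cs) : pvStepA cs st c = pvStepB cs st c := by
  unfold pvStepA pvStepB
  by_cases hcontains : PySem.Dict.contains st.1 c = true
  · rw [if_pos hcontains, if_pos hcontains]
  · rw [if_neg hcontains, if_neg hcontains]
    have hn1 : (PySem.List.dedup cs).length ≤ cs.length := by
      rw [PySem.List.dedup_eq_ofList]
      exact PySem.Set.length_ofList_le cs
    have hm0 : pvM (PySem.List.dedup cs) PySem.Set.empty ≤ (PySem.List.dedup cs).length := by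
      unfold pvM
      exact List.length_filter_le _ _
    have hm1 := pv_m_add (PySem.List.dedup cs) PySem.Set.empty c (pv_U_nodup cs) hc
      (List.not_mem_nil)
    have hlink : pvM (PySem.List.dedup cs) PySem.Set.empty
          * ((PySem.List.dedup cs).length + 1)
        = pvM (PySem.List.dedup cs) (PySem.Set.add PySem.Set.empty c)
            * ((PySem.List.dedup cs).length + 1)
          + ((PySem.List.dedup cs).length + 1) := by
      rw [← hm1]
      ring
    have hnbl := pv_nb_len (U := PySem.List.dedup cs) c
    have hr1 : pvRank (PySem.List.dedup cs) (PySem.Set.add PySem.Set.empty c)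
        (pvNb (PySem.List.dedup cs) c)
        = pvM (PySem.List.dedup cs) (PySem.Set.add PySem.Set.empty c)
            * ((PySem.List.dedup cs).length + 1)
          + (pvNb (PySem.List.dedup cs) c).length := rfl
    have hr0 : pvRank (PySem.List.dedup cs) PySem.Set.empty [c]
        = pvM (PySem.List.dedup cs) PySem.Set.empty
            * ((PySem.List.dedup cs).length + 1) + 1 := rfl
    have hA := pv_findAll_eq cs c hc (fuel := cs.length + 1)
      (F := pvRank (PySem.List.dedup cs) (PySem.Set.add PySem.Set.empty c)
        (pvNb (PySem.List.dedup cs) c) + 1)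
      (by omega) (by omega)
    have hnpos : 1 ≤ (PySem.List.dedup cs).length := List.length_pos_of_mem hc
    have hmul0 : pvM (PySem.List.dedup cs) PySem.Set.empty
          * ((PySem.List.dedup cs).length + 1)
        ≤ (PySem.List.dedup cs).length * ((PySem.List.dedup cs).length + 1) :=
      Nat.mul_le_mul_right _ hm0
    have hsq : ((PySem.List.dedup cs).length + 1) * ((PySem.List.dedup cs).length + 1)
        = (PySem.List.dedup cs).length * ((PySem.List.dedup cs).length + 1)
          + ((PySem.List.dedup cs).length + 1) := by ring
    have hB := pv_flood_eq cs (pvRank (PySem.List.dedup cs) PySem.Set.empty [c])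
      (((PySem.List.dedup cs).length + 1) * ((PySem.List.dedup cs).length + 1))
      (pvRank (PySem.List.dedup cs) PySem.Set.empty [c] + 1)
      st.1 PySem.Set.empty [c] st.2
      (by
        intro x hx
        rw [List.mem_singleton] at hx
        exact hx ▸ hc)
      (le_refl _)
      (by
        rw [hr0]
        omega)
      (by omega)
    rw [hA, hB]
    have hTI : pvTrav (pvNb (PySem.List.dedup cs))
          (pvRank (PySem.List.dedup cs) PySem.Set.empty [c])
          (PySem.Set.add PySem.Set.empty c) (pvNb (PySem.List.dedup cs) c)
        = pvTrav (pvNb (PySem.List.dedup cs))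
          (pvRank (PySem.List.dedup cs) (PySem.Set.add PySem.Set.empty c)
            (pvNb (PySem.List.dedup cs) c) + 1)
          (PySem.Set.add PySem.Set.empty c) (pvNb (PySem.List.dedup cs) c) := by
      refine pv_trav_fuel (pvNb (PySem.List.dedup cs)) (PySem.List.dedup cs)
        (pv_U_nodup cs) pv_nb_mem pv_nb_len
        (pvRank (PySem.List.dedup cs) (PySem.Set.add PySem.Set.empty c)
          (pvNb (PySem.List.dedup cs) c))
        _ _ _ _ (fun x hx => pv_nb_mem _ x hx) (le_refl _) ?_ (by omega)
      rw [hr0, hr1]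
      omega
    have hunfold : pvTrav (pvNb (PySem.List.dedup cs))
          (pvRank (PySem.List.dedup cs) PySem.Set.empty [c] + 1) PySem.Set.empty [c]
        = ((c :: ((pvTrav (pvNb (PySem.List.dedup cs))
              (pvRank (PySem.List.dedup cs) (PySem.Set.add PySem.Set.empty c)
                (pvNb (PySem.List.dedup cs) c) + 1)
              (PySem.Set.add PySem.Set.empty c) (pvNb (PySem.List.dedup cs) c)).1 ++ [])),
           (pvTrav (pvNb (PySem.List.dedup cs))
              (pvRank (PySem.List.dedup cs) (PySem.Set.add PySem.Set.empty c)
                (pvNb (PySem.List.dedup cs) c) + 1)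
              (PySem.Set.add PySem.Set.empty c) (pvNb (PySem.List.dedup cs) c)).2) := by
      simp only [pvTrav]
      rw [if_neg (show c ∉ (PySem.Set.empty : PySem.Set (List Int)) from fun h => List.not_mem_nil h), hTI]
    rw [hunfold]
    simp only [List.foldl_cons, List.append_nil]

-- ===== VERDICT (by name: the statement is the Claim_ definition above) =====
theorem assign_constelations_spec : Claim_equal_assign_constelations := by
  unfold Claim_equal_assign_constelations
  intro cs _ _
  unfold Spec_assign_constelations
  rw [pvA_eq_fold cs, pvB_eq_fold cs, pv_foldA_dedup cs cs (PySem.Dict.empty, 0)]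
  rw [PySem.List.foldl_congr_mem (PySem.List.dedup cs) (pvStepA cs) (pvStepB cs)
    (PySem.Dict.empty, 0) (fun acc x hx => pv_step_eq cs acc x hx)]
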